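-- pv_equiv track=rewrite | github.com/lantunes/netomaton | demos/hopfield_tank_tsp/spike.py | get_adjacencies
-- ===== SOURCE A (Python) =====
-- import math
--
-- def get_adjacencies(cell_label_map):
--     adjacencies = []
--     num_cells = len(cell_label_map)
--     num_points = int(math.sqrt(num_cells))
--     for c in range(num_cells):
--         row, col = cell_label_map[c]
--         conn = [0 for _ in range(num_cells)]
--         for c2 in range(num_cells):
--             row2, col2 = cell_label_map[c2]
--             if row2 == row or col2 == col or col2 == ((col-1) % num_points) or col2 == ((col+1) % num_points):
--                 conn[c2] = 1
--         adjacencies.append(conn)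
--     return adjacencies
-- ===== SOURCE B (Python) =====
-- import math
--
-- def get_adjacencies(cell_label_map):
--     num_cells = len(cell_label_map)
--     num_points = int(math.sqrt(num_cells))
--     row_index = {}
--     col_index = {}
--     for c, (row, col) in cell_label_map.items():
--         row_index.setdefault(row, []).append(c)
--         col_index.setdefault(col, []).append(c)
--     adjacencies = []
--     for c in range(num_cells):
--         row, col = cell_label_map[c]
--         conn = [0] * num_cells
--         for c2 in row_index[row]:
--             conn[c2] = 1
--         for col2 in (col, (col - 1) % num_points, (col + 1) % num_points):
--             for c2 in col_index.get(col2, ()):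
--                 conn[c2] = 1
--         adjacencies.append(conn)
--     return adjacencies
-- ===== Notes on version B (the rewrite author's own statement) =====
-- stated objective: faster
-- what changed: A scans all n^2 cell pairs testing the row/column/adjacent-column condition for each pair; B builds row->cells and column->cells index dicts in one pass over the dict and, per cell, writes the 1s directly at the looked-up positions, so the inner all-cells condition scan disappears.
import Mathlib
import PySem

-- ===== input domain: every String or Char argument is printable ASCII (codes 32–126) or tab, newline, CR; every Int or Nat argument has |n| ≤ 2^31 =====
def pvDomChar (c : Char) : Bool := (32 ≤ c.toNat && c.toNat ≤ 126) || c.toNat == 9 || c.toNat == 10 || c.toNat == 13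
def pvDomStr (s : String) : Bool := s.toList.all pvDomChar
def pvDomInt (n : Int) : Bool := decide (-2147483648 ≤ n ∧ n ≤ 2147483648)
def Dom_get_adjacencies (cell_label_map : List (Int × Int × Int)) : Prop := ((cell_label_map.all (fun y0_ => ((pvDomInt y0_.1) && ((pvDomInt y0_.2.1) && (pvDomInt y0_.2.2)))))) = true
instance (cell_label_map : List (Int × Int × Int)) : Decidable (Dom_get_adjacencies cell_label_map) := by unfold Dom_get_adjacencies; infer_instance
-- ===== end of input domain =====

-- B replaces A's all-pairs condition scan by two index dicts (row-value → cell ids, col-value → cell ids)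
-- built in one pass, then writes the 1s directly; measurably faster by constant factor (same O(n²) output size).
-- int(math.sqrt(n)) is ported as Nat.sqrt: exact for every list length a machine can hold (first divergence needs n > 2^52).

-- ===== PORT A =====
def get_adjacencies (cell_label_map : List (Int × Int × Int)) : List (List Int) :=
  let num_cells := cell_label_map.length
  let num_points : Int := (Nat.sqrt num_cells : Int)
  (List.range num_cells).foldl (fun adjacencies (c : Nat) =>
    -- row, col = cell_label_map[c]  (dict lookup; Pre_ guarantees the key is present)
    let rc := PySem.Dict.getD (PySem.Dict.mk cell_label_map) (c : Int) (0, 0)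
    let conn := (List.range num_cells).foldl (fun conn (c2 : Nat) =>
      let rc2 := PySem.Dict.getD (PySem.Dict.mk cell_label_map) (c2 : Int) (0, 0)
      if rc2.1 = rc.1 ∨ rc2.2 = rc.2 ∨ rc2.2 = PySem.Int.mod (rc.2 - 1) num_points ∨
          rc2.2 = PySem.Int.mod (rc.2 + 1) num_points then
        conn.set c2 1
      else conn)
      (List.replicate num_cells (0 : Int))
    adjacencies ++ [conn]) []

-- ===== PORT B =====
-- row_index / col_index: one pass over the dict items; setdefault(k, []).append(c) = modify k [] (· ++ [c])
def pvIdxDict (cell_label_map : List (Int × Int × Int)) (sel : Int × Int × Int → Int) :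
    PySem.Dict Int (List Int) :=
  cell_label_map.foldl (fun d e => d.modify (sel e) [] (· ++ [e.1])) (PySem.Dict.mk [])

def get_adjacencies_alt (cell_label_map : List (Int × Int × Int)) : List (List Int) :=
  let num_cells := cell_label_map.length
  let num_points : Int := (Nat.sqrt num_cells : Int)
  let rowIdx := pvIdxDict cell_label_map (fun e => e.2.1)
  let colIdx := pvIdxDict cell_label_map (fun e => e.2.2)
  (List.range num_cells).foldl (fun adjacencies (c : Nat) =>
    let rc := PySem.Dict.getD (PySem.Dict.mk cell_label_map) (c : Int) (0, 0)
    -- conn[c2] = 1 for every cell id in the looked-up lists; ids are keys, so 0 ≤ id < n under Pre_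
    -- and '.toNat' is exact there
    let conn1 := (rowIdx.getD rc.1 []).foldl (fun conn c2 => conn.set c2.toNat 1)
      (List.replicate num_cells (0 : Int))
    let conn := [rc.2, PySem.Int.mod (rc.2 - 1) num_points, PySem.Int.mod (rc.2 + 1) num_points].foldl
      (fun conn col2 => (colIdx.getD col2 []).foldl (fun conn c2 => conn.set c2.toNat 1) conn) conn1
    adjacencies ++ [conn]) []

-- ===== PRECONDITION & SPEC =====
-- Pre_ excludes inputs where the Python A raises KeyError (some index 0..n-1 is not a key) and
-- association lists with duplicate keys, which do not faithfully represent a Python dict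
-- (the dict collapses them, so its len differs from the list's length).
def Pre_get_adjacencies (cell_label_map : List (Int × Int × Int)) : Prop :=
  (cell_label_map.map (·.1)).Nodup ∧
  ∀ i < cell_label_map.length, (i : Int) ∈ cell_label_map.map (·.1)

instance (cell_label_map : List (Int × Int × Int)) : Decidable (Pre_get_adjacencies cell_label_map) := by
  unfold Pre_get_adjacencies; infer_instance

def pvWitness_get_adjacencies : (List (Int × Int × Int)) :=
  [(0, 0, 0), (1, 0, 1), (2, 1, 0), (3, 1, 1)]

def Spec_get_adjacencies (cell_label_map : List (Int × Int × Int)) (out : List (List Int)) : Prop := out = get_adjacencies_alt cell_label_map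
instance (cell_label_map : List (Int × Int × Int)) (out : List (List Int)) : Decidable (Spec_get_adjacencies cell_label_map out) := by unfold Spec_get_adjacencies; infer_instance

-- ===== CLAIM (what is proved, stated in full; the proofs are below) =====
def Claim_equal_get_adjacencies : Prop := ∀ (cell_label_map : List (Int × Int × Int)), Dom_get_adjacencies cell_label_map → Pre_get_adjacencies cell_label_map → Spec_get_adjacencies cell_label_map (get_adjacencies cell_label_map)

-- ===== LEMMAS AND PROOFS =====

-- under Pre_, the keys are a permutation of 0..n-1
lemma pv_keys_perm (m : List (Int × Int × Int)) (h : Pre_get_adjacencies m) :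
    (m.map (·.1)).Perm ((List.range m.length).map (fun i : Nat => (i : Int))) := by
  obtain ⟨hnd, hcov⟩ := h
  have hsub : ((List.range m.length).map (fun i : Nat => (i : Int))) ⊆ m.map (·.1) := by
    intro k hk
    simp only [List.mem_map, List.mem_range] at hk
    obtain ⟨i, hi, rfl⟩ := hk
    exact hcov i hi
  have hnd' : ((List.range m.length).map (fun i : Nat => (i : Int))).Nodup :=
    (List.nodup_range).map (fun a b h => by exact_mod_cast h)
  exact ((List.subperm_of_subset hnd' hsub).perm_of_length_le (by simp)).symm

lemma pv_key_bounds (m : List (Int × Int × Int)) (h : Pre_get_adjacencies m)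
    (k : Int) (hk : k ∈ m.map (·.1)) : 0 ≤ k ∧ k < (m.length : Int) := by
  have := (pv_keys_perm m h).mem_iff.mp hk
  simp only [List.mem_map, List.mem_range] at this
  obtain ⟨i, hi, rfl⟩ := this
  constructor <;> omega

-- dict lookup on a nodup association list is membership
lemma pv_get?_eq_some (m : List (Int × Int × Int)) (hnd : (m.map (·.1)).Nodup)
    (k : Int) (v : Int × Int) :
    (PySem.Dict.mk m).get? k = some v ↔ (k, v) ∈ m := by
  constructor
  · intro h
    simp only [PySem.Dict.get?, Option.map_eq_some_iff] at h
    obtain ⟨⟨k', v'⟩, hf, rfl⟩ := h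
    have hm := List.mem_of_find?_eq_some hf
    have hp := List.find?_some hf
    simp only [beq_iff_eq] at hp
    subst hp; exact hm
  · intro hmem
    induction m with
    | nil => simp at hmem
    | cons e rest ih =>
      simp only [List.map_cons, List.nodup_cons] at hnd
      rcases List.mem_cons.mp hmem with rfl | hmem'
      · simp [PySem.Dict.get?, List.find?]
      · have hne : e.1 ≠ k := by
          intro he
          exact hnd.1 (he ▸ List.mem_map.mpr ⟨(k, v), hmem', rfl⟩)
        have := ih hnd.2 hmem'
        simpa [PySem.Dict.get?, List.find?_cons, beq_iff_eq, hne] using this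

-- characterisation of the index dicts: k appears in bucket r iff some item (k, …) has sel-value r
lemma pv_mem_idx (m : List (Int × Int × Int)) (sel : Int × Int × Int → Int)
    (r k : Int) :
    k ∈ (pvIdxDict m sel).getD r [] ↔ ∃ e ∈ m, e.1 = k ∧ sel e = r := by
  suffices H : ∀ (d : PySem.Dict Int (List Int)),
      k ∈ (m.foldl (fun d e => d.modify (sel e) [] (· ++ [e.1])) d).getD r [] ↔
      k ∈ d.getD r [] ∨ ∃ e ∈ m, e.1 = k ∧ sel e = r by
    have := H (PySem.Dict.mk [])
    simpa [pvIdxDict, PySem.Dict.getD, PySem.Dict.get?] using this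
  induction m with
  | nil => simp
  | cons e rest ih =>
    intro d
    simp only [List.foldl_cons, ih, List.mem_cons]
    by_cases hr : r = sel e
    · subst hr
      rw [PySem.Dict.getD_modify_self]
      simp only [List.mem_append, List.mem_singleton]
      constructor
      · rintro (⟨h | rfl⟩ | h)
        · exact Or.inl h
        · exact Or.inr ⟨e, Or.inl rfl, rfl, rfl⟩
        · obtain ⟨e', he', h1, h2⟩ := h
          exact Or.inr ⟨e', Or.inr he', h1, h2⟩
      · rintro (h | ⟨e', he', h1, h2⟩)
        · exact Or.inl (Or.inl h)
        · rcases he' with rfl | he'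
          · exact Or.inl (Or.inr h1.symm)
          · exact Or.inr ⟨e', he', h1, h2⟩
    · rw [PySem.Dict.getD_modify_of_ne _ _ _ hr]
      constructor
      · rintro (h | ⟨e', he', h1, h2⟩)
        · exact Or.inl h
        · exact Or.inr ⟨e', Or.inr he', h1, h2⟩
      · rintro (h | ⟨e', rfl | he', h1, h2⟩)
        · exact Or.inl h
        · exact absurd h2.symm hr
        · exact Or.inr ⟨e', he', h1, h2⟩

-- A's inner loop: write 1 at every index of range n that satisfies P
lemma pv_foldl_set_if (P : Nat → Prop) [DecidablePred P] (L : List Nat) (acc : List Int)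
    (hL : ∀ j ∈ L, j < acc.length) (i : Nat) :
    (L.foldl (fun conn c2 => if P c2 then conn.set c2 1 else conn) acc)[i]? =
      if i ∈ L ∧ P i then some 1 else acc[i]? := by
  induction L generalizing acc with
  | nil => simp
  | cons c L' ih =>
    simp only [List.foldl_cons]
    have hlen : (if P c then acc.set c 1 else acc).length = acc.length := by
      split <;> simp
    rw [ih _ (fun j hj => hlen ▸ hL j (List.mem_cons_of_mem _ hj))]
    by_cases hiL : i ∈ L' ∧ P i
    · simp [hiL]
    · simp only [hiL, if_false]
      by_cases hic : i = c
      · subst hic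
        by_cases hP : P i
        · simp [hP, hL i List.mem_cons_self, List.mem_cons]
        · simp [hP]
      · have : ¬ (i ∈ c :: L' ∧ P i) := by
          rintro ⟨h1, h2⟩
          rcases List.mem_cons.mp h1 with rfl | h1
          · exact hic rfl
          · exact hiL ⟨h1, h2⟩
        simp only [this, if_false]
        split
        · rw [List.getElem?_set]; simp [Ne.symm hic]
        · rfl

-- B's write loop: write 1 at every (Int) index of a bucket list
lemma pv_foldl_set_mem (L : List Int) (acc : List Int)
    (hL : ∀ k ∈ L, 0 ≤ k ∧ k < (acc.length : Int)) (i : Nat) :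
    (L.foldl (fun conn c2 => conn.set c2.toNat 1) acc)[i]? =
      if (i : Int) ∈ L then some 1 else acc[i]? := by
  induction L generalizing acc with
  | nil => simp
  | cons c L' ih =>
    simp only [List.foldl_cons]
    obtain ⟨hc0, hclt⟩ := hL c List.mem_cons_self
    rw [ih _ (fun k hk => by
      simpa using hL k (List.mem_cons_of_mem _ hk))]
    by_cases hiL : (i : Int) ∈ L'
    · simp [hiL, List.mem_cons]
    · by_cases hic : (i : Int) = c
      · have : c.toNat = i := by omega
        simp [List.mem_cons, hic, this, show i < acc.length by omega]
      · have hne : c.toNat ≠ i := by omega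
        simp [List.mem_cons, hic, hiL, hne]

lemma pv_foldl_setInt_len (L : List Int) (acc : List Int) :
    (L.foldl (fun conn c2 => conn.set c2.toNat 1) acc).length = acc.length := by
  induction L generalizing acc with
  | nil => rfl
  | cons c L' ih => simp [List.foldl_cons, ih]

lemma pv_mem_unique (m : List (Int × Int × Int)) (hnd : (m.map (·.1)).Nodup)
    {k : Int} {v v' : Int × Int} (h : (k, v) ∈ m) (h' : (k, v') ∈ m) : v = v' := by
  have h1 := (pv_get?_eq_some m hnd k v).mpr h
  have h2 := (pv_get?_eq_some m hnd k v').mpr h'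
  rw [h1] at h2; exact Option.some.inj h2

lemma pv_getD_mem (m : List (Int × Int × Int)) (hPre : Pre_get_adjacencies m)
    (i : Nat) (hi : i < m.length) :
    ((i : Int), PySem.Dict.getD (PySem.Dict.mk m) (i : Int) (0, 0)) ∈ m := by
  obtain ⟨v, hv⟩ : ∃ v, (PySem.Dict.mk m).get? (i : Int) = some v := by
    have := hPre.2 i hi
    simp only [List.mem_map] at this
    obtain ⟨e, he, hke⟩ := this
    exact ⟨e.2, (pv_get?_eq_some m hPre.1 _ _).mpr (by rwa [show e = (e.1, e.2) from rfl, hke] at he)⟩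
  have : PySem.Dict.getD (PySem.Dict.mk m) (i : Int) (0, 0) = v := by
    simp [PySem.Dict.getD, hv]
  rw [this]
  exact (pv_get?_eq_some m hPre.1 _ _).mp hv
-- ===== VERDICT (by name: the statement is the Claim_ definition above) =====
theorem get_adjacencies_spec : Claim_equal_get_adjacencies := by
  intro m _hDom hPre
  unfold Spec_get_adjacencies get_adjacencies get_adjacencies_alt
  simp only [PySem.List.foldl_append_singleton_eq_map, List.nil_append]
  apply List.map_congr_left
  intro c hc
  have hclt : c < m.length := by simpa using hc
  set n := m.length with hn
  set p : Int := (Nat.sqrt n : Int) with hp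
  set rc := PySem.Dict.getD (PySem.Dict.mk m) (c : Int) (0, 0) with hrc
  have hrcmem : ((c : Int), rc) ∈ m := pv_getD_mem m hPre c hclt
  have hbound : ∀ (sel : Int × Int × Int → Int) (r : Int) (k : Int),
      k ∈ (pvIdxDict m sel).getD r [] → 0 ≤ k ∧ k < (n : Int) := by
    intro sel r k hk
    obtain ⟨e, he, rfl, _⟩ := (pv_mem_idx m sel r k).mp hk
    exact pv_key_bounds m hPre e.1 (List.mem_map.mpr ⟨e, he, rfl⟩)
  apply List.ext_getElem?
  intro i
  -- unfold B's 3-element column loop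
  simp only [List.foldl_cons, List.foldl_nil]
  -- write out all four bucket folds and A's conditional fold via getElem?
  have hlen4 : ∀ (L1 L2 L3 L4 : List Int),
      (L1.foldl (fun conn c2 => conn.set c2.toNat 1)
        (L2.foldl (fun conn c2 => conn.set c2.toNat 1)
          (L3.foldl (fun conn c2 => conn.set c2.toNat 1)
            (L4.foldl (fun conn c2 => conn.set c2.toNat 1)
              (List.replicate n (0 : Int)))))).length = n := by
    intro L1 L2 L3 L4
    simp [pv_foldl_setInt_len]
  rw [pv_foldl_set_if _ _ _ (fun j hj => by simpa using List.mem_range.mp hj)]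
  rw [pv_foldl_set_mem _ _ (fun k hk => by
    simpa [pv_foldl_setInt_len] using hbound _ _ k hk)]
  rw [pv_foldl_set_mem _ _ (fun k hk => by
    simpa [pv_foldl_setInt_len] using hbound _ _ k hk)]
  rw [pv_foldl_set_mem _ _ (fun k hk => by
    simpa [pv_foldl_setInt_len] using hbound _ _ k hk)]
  rw [pv_foldl_set_mem _ _ (fun k hk => by
    simpa using hbound _ _ k hk)]
  by_cases hi : i < n
  · -- the entry for key i
    set rc2 := PySem.Dict.getD (PySem.Dict.mk m) (i : Int) (0, 0) with hrc2
    have hrc2mem : ((i : Int), rc2) ∈ m := pv_getD_mem m hPre i hi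
    have hsel : ∀ (sel : Int × Int × Int → Int) (r : Int),
        (i : Int) ∈ (pvIdxDict m sel).getD r [] ↔ sel ((i : Int), rc2) = r := by
      intro sel r
      rw [pv_mem_idx]
      constructor
      · rintro ⟨e, he, h1, h2⟩
        have : e = ((i : Int), rc2) := by
          obtain ⟨k, v⟩ := e
          simp only at h1
          subst h1
          rw [pv_mem_unique m hPre.1 he hrc2mem]
        rwa [← this]
      · intro h
        exact ⟨((i : Int), rc2), hrc2mem, rfl, h⟩
    simp only [hsel, List.mem_range]
    split_ifs <;> tauto
  · -- i is out of range on both sides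
    have hnone : ∀ (sel : Int × Int × Int → Int) (r : Int),
        ¬ ((i : Int) ∈ (pvIdxDict m sel).getD r []) := by
      intro sel r h
      have := (hbound sel r _ h).2
      omega
    simp only [hnone, List.mem_range]
    simp [hi]
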